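-- pv_equiv track=rewrite | github.com/miliar/Code_Jam_Webscraper | Solutions_python/Problem_178/2754.py | GetMaxPositiveIndex
-- ===== SOURCE A (Python) =====
-- def GetMaxPositiveIndex(N):
-- 	maxCounter,counter,index=0,0,0
-- 	for x in range(len(N)):
-- 		if(N[x]=='+'):
-- 			counter+=1
-- 		else:
-- 			counter-=1
-- 		if(counter>=maxCounter):
-- 			maxCounter=counter
-- 			index=x
-- 	return index
-- ===== SOURCE B (Python) =====
-- def GetMaxPositiveIndex(N):
--     prefix = []
--     c = 0
--     for ch in N:
--         c = c + (1 if ch == '+' else -1)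
--         prefix.append(c)
--     M = 0
--     for p in prefix:
--         if p > M:
--             M = p
--     idx = 0
--     for i, p in enumerate(prefix):
--         if p == M:
--             idx = i
--     return idx
-- ===== Notes on version B (the rewrite author's own statement) =====
-- stated objective: alternative
-- what changed: Replaces A's single fused loop (tracking running max and its position together) with a three-pass decomposition: build the prefix-sum table, compute the max against baseline 0, then scan for the last index attaining it.
import Mathlib
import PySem

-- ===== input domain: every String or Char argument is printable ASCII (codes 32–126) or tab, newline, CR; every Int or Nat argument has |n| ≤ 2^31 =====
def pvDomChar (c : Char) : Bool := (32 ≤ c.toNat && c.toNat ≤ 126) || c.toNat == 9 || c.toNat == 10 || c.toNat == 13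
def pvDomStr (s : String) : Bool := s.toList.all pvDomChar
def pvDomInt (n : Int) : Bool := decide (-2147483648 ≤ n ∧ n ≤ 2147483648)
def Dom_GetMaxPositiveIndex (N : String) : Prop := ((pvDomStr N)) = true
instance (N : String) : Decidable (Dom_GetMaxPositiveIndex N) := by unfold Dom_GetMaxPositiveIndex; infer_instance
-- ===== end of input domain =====

-- B replaces A's fused running-max-with-position loop by a three-pass decomposition
-- (build prefix sums, take the max vs baseline 0, scan for its last index); alternative, not faster.

-- ===== PORT A =====
-- for x in range(len(N)) with N[x]: ported as a fold over the enumerated character list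
-- (indices 0..len-1 paired with the characters, exactly what the loop reads).
def GetMaxPositiveIndex (N : String) : Int :=
  let st := (PySem.List.enumerate N.toList).foldl
    (fun (s : Int × Int × Int) (q : Int × Char) =>
      let counter := if q.2 = '+' then s.2.1 + 1 else s.2.1 - 1
      if counter ≥ s.1 then (counter, counter, q.1) else (s.1, counter, s.2.2))
    (0, 0, 0)
  st.2.2

-- ===== PORT B =====
-- first loop of Source B: build the prefix-sum list, carrying the running counter
def altPrefix (cs : List Char) : List Int × Int :=
  cs.foldl (fun acc ch =>
    let c := acc.2 + (if ch = '+' then (1 : Int) else -1)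
    (acc.1 ++ [c], c)) ([], 0)

-- second loop of Source B: max of the prefixes against baseline 0
def altMax (ps : List Int) : Int :=
  ps.foldl (fun m p => if p > m then p else m) 0

-- third loop of Source B: last index whose prefix equals M (default 0)
def altIdx (ps : List Int) (M : Int) : Int :=
  (PySem.List.enumerate ps).foldl (fun idx q => if q.2 = M then q.1 else idx) 0

def GetMaxPositiveIndex_alt (N : String) : Int :=
  let ps := (altPrefix N.toList).1
  altIdx ps (altMax ps)

-- ===== PRECONDITION & SPEC =====
def Spec_GetMaxPositiveIndex (N : String) (out : Int) : Prop := out = GetMaxPositiveIndex_alt N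
instance (N : String) (out : Int) : Decidable (Spec_GetMaxPositiveIndex N out) := by unfold Spec_GetMaxPositiveIndex; infer_instance

-- ===== CLAIM (what is proved, stated in full; the proofs are below) =====
def Claim_equal_GetMaxPositiveIndex : Prop := ∀ (N : String), Dom_GetMaxPositiveIndex N → Spec_GetMaxPositiveIndex N (GetMaxPositiveIndex N)

-- ===== LEMMAS AND PROOFS =====

-- A's loop body, named for the proofs
def stepA (s : Int × Int × Int) (q : Int × Char) : Int × Int × Int :=
  let counter := if q.2 = '+' then s.2.1 + 1 else s.2.1 - 1
  if counter ≥ s.1 then (counter, counter, q.1) else (s.1, counter, s.2.2)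

lemma altPrefix_snoc (cs : List Char) (a : Char) :
    altPrefix (cs ++ [a]) =
      ((altPrefix cs).1 ++ [(altPrefix cs).2 + (if a = '+' then 1 else -1)],
       (altPrefix cs).2 + (if a = '+' then 1 else -1)) := by
  simp [altPrefix, List.foldl_append]

lemma altPrefix_len (cs : List Char) : (altPrefix cs).1.length = cs.length := by
  induction cs using List.reverseRecOn with
  | nil => simp [altPrefix]
  | append_singleton cs a ih => simp [altPrefix_snoc, ih]

lemma altMax_snoc (ps : List Int) (c : Int) :
    altMax (ps ++ [c]) = if c > altMax ps then c else altMax ps := by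
  simp [altMax, List.foldl_append]

lemma altIdx_snoc (ps : List Int) (c M : Int) :
    altIdx (ps ++ [c]) M =
      if c = M then (ps.length : Int) else altIdx ps M := by
  simp [altIdx, PySem.List.enumerate_append, List.foldl_append, PySem.List.enumerate_cons]

-- main invariant: A's fold state is exactly (B's max, B's running counter, B's last index)
lemma main_inv (cs : List Char) :
    (PySem.List.enumerate cs).foldl stepA (0, 0, 0) =
      (altMax (altPrefix cs).1, (altPrefix cs).2,
       altIdx (altPrefix cs).1 (altMax (altPrefix cs).1)) := by
  induction cs using List.reverseRecOn with
  | nil => simp [altPrefix, altMax, altIdx, PySem.List.enumerate_nil]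
  | append_singleton cs a ih =>
    rw [PySem.List.enumerate_append, List.foldl_append, ih,
        PySem.List.enumerate_cons]
    set ps := (altPrefix cs).1 with hps
    set M := altMax ps with hM
    set c' := (altPrefix cs).2 + (if a = '+' then (1 : Int) else -1) with hc'
    have hlen : (ps.length : Int) = (cs.length : Int) := by
      rw [hps, altPrefix_len cs]
    have hstep : stepA (M, (altPrefix cs).2,  altIdx ps M) ((cs.length : Int), a) =
        (if c' ≥ M then (c', c', (cs.length : Int)) else (M, c', altIdx ps M)) := by
      simp only [stepA]
      split_ifs with h1 h2 h2 <;> simp_all <;> omega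
    simp only [PySem.List.enumerate_nil, List.foldl_cons, List.foldl_nil, zero_add]
    rw [hstep, altPrefix_snoc cs a, ← hc']
    rw [altMax_snoc, altIdx_snoc, hlen, ← hps, ← hM]
    rcases lt_trichotomy c' M with h | h | h
    · have h1 : ¬ M ≤ c' := not_le.mpr h
      have h2 : ¬ M < c' := by omega
      have h3 : c' ≠ M := ne_of_lt h
      simp [h1, h2, h3]
    · rw [h]
      simp
    · have h1 : M ≤ c' := le_of_lt h
      simp [h1, h]

-- ===== VERDICT (by name: the statement is the Claim_ definition above) =====
theorem GetMaxPositiveIndex_spec : Claim_equal_GetMaxPositiveIndex := by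
  intro N _
  show GetMaxPositiveIndex N = GetMaxPositiveIndex_alt N
  unfold GetMaxPositiveIndex GetMaxPositiveIndex_alt
  have := main_inv N.toList
  simp only [show (fun (s : Int × Int × Int) (q : Int × Char) =>
      let counter := if q.2 = '+' then s.2.1 + 1 else s.2.1 - 1
      if counter ≥ s.1 then (counter, counter, q.1) else (s.1, counter, s.2.2)) = stepA from rfl]
  rw [this]
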